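-- pv_equiv track=rewrite | github.com/SohaibAamir28/CALICO-Fall-25 | problem-4b1/main.py | c_s_r
-- ===== SOURCE A (Python) =====
-- def c_s_r(l_p, l_t):
--     a = 0
--     for i in range(len(l_p)):
--         p_type, x, y = l_p[i]
--         c_t_p_a = False
--         if l_t == 'horiz' or l_t == 'vert':
--             if p_type in ('R', 'Q'):
--                 c_t_p_a = True
--         elif l_t == 'diag':
--             if p_type in ('B', 'Q'):
--                 c_t_p_a = True
--         if c_t_p_a:
--             if i > 0:
--                 a += 1
--             if i < len(l_p) - 1:
--                 a += 1
--     return a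
-- ===== SOURCE B (Python) =====
-- def c_s_r(l_p, l_t):
--     # edge-based counting: each qualifying piece scores 1 per neighbour, so the
--     # answer is the sum over adjacent pairs of the two qualifying bits.
--     if l_t in ('horiz', 'vert'):
--         good = ('R', 'Q')
--     elif l_t == 'diag':
--         good = ('B', 'Q')
--     else:
--         good = ()
--     return sum((a[0] in good) + (b[0] in good) for a, b in zip(l_p, l_p[1:]))
-- ===== Notes on version B (the rewrite author's own statement) =====
-- stated objective: alternative
-- what changed: Recasts the count as a sum over the n-1 adjacent edges of the list (zip with its tail), adding the qualifying bit of each edge endpoint, instead of A's indexed per-element loop with i>0 / i<n-1 endpoint tests.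
import Mathlib
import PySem

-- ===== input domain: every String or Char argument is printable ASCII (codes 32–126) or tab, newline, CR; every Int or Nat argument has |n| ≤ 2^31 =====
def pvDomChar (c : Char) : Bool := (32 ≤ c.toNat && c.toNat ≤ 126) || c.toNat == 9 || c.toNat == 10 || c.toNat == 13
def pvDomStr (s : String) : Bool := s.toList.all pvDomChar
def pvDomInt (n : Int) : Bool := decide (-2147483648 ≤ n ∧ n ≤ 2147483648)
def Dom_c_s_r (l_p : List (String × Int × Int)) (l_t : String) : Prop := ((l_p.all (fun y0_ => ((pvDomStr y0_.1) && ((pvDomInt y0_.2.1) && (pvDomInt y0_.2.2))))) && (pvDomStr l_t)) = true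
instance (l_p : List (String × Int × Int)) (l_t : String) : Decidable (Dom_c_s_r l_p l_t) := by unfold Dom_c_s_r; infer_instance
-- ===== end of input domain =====

-- B recasts A's indexed per-element loop (with i>0 / i<n-1 endpoint tests) as a sum over the
-- adjacent edges of the list (zip with its tail), adding the qualifying bit of each edge endpoint.


-- ===== PORT A =====
-- literal port of A: loop i over range(len(l_p)), test the piece at index i, add 1 for i>0 and 1 for i<len-1
def c_s_r (l_p : List (String × Int × Int)) (l_t : String) : Int :=
  (List.range l_p.length).foldl (fun a i =>
    let p_type := (l_p.getD i ("", 0, 0)).1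
    let c_t_p_a : Bool :=
      if l_t == "horiz" || l_t == "vert" then (p_type == "R" || p_type == "Q")
      else if l_t == "diag" then (p_type == "B" || p_type == "Q")
      else false
    let a := if c_t_p_a && decide (0 < i) then a + 1 else a
    let a := if c_t_p_a && decide (i < l_p.length - 1) then a + 1 else a
    a) 0

-- ===== PORT B =====
-- B's qualifying predicate ('p in good' for the tuple chosen from l_t)
def c_s_r_good (l_t p : String) : Bool :=
  if l_t == "horiz" || l_t == "vert" then p == "R" || p == "Q"
  else if l_t == "diag" then p == "B" || p == "Q"
  else false

-- sum over adjacent edges (zip of the list with its tail) of the two qualifying bits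
def c_s_r_alt (l_p : List (String × Int × Int)) (l_t : String) : Int :=
  ((l_p.zip (l_p.drop 1)).map (fun ab =>
      (if c_s_r_good l_t ab.1.1 then (1 : Int) else 0)
      + (if c_s_r_good l_t ab.2.1 then (1 : Int) else 0))).sum

-- ===== PRECONDITION & SPEC =====
def Spec_c_s_r (l_p : List (String × Int × Int)) (l_t : String) (out : Int) : Prop := out = c_s_r_alt l_p l_t
instance (l_p : List (String × Int × Int)) (l_t : String) (out : Int) : Decidable (Spec_c_s_r l_p l_t out) := by unfold Spec_c_s_r; infer_instance

-- ===== CLAIM (what is proved, stated in full; the proofs are below) =====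
def Claim_equal_c_s_r : Prop := ∀ (l_p : List (String × Int × Int)) (l_t : String), Dom_c_s_r l_p l_t → Spec_c_s_r l_p l_t (c_s_r l_p l_t)

-- ===== LEMMAS AND PROOFS =====

-- plain count: the 0/1 sum over all indices is countP
theorem pv_sum_count (q : String × Int × Int → Bool) (l : List (String × Int × Int)) :
    ((List.range l.length).map (fun i => if q (l.getD i ("", 0, 0)) then (1 : Int) else 0)).sum
      = (l.countP q : Int) := by
  induction l with
  | nil => simp
  | cons x xs ih =>
    simp only [List.length_cons, List.range_succ_eq_map, List.map_cons, List.map_map,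
      List.sum_cons, List.countP_cons]
    have hf : ((fun i => if q ((x :: xs).getD i ("", 0, 0)) then (1 : Int) else 0) ∘ Nat.succ)
        = (fun i => if q (xs.getD i ("", 0, 0)) then (1 : Int) else 0) := by
      funext i; rfl
    rw [hf, ih]
    by_cases hq : q x <;> simp [hq, Int.add_comm]

-- the "i > 0" 0/1 sum is countP of the tail
theorem pv_sum_tail (q : String × Int × Int → Bool) (l : List (String × Int × Int)) :
    ((List.range l.length).map
        (fun i => if q (l.getD i ("", 0, 0)) && decide (0 < i) then (1 : Int) else 0)).sum
      = ((l.drop 1).countP q : Int) := by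
  cases l with
  | nil => simp
  | cons x xs =>
    simp only [List.length_cons, List.range_succ_eq_map, List.map_cons, List.map_map,
      List.sum_cons, List.drop_succ_cons, List.drop_zero]
    have hf : ((fun i => if q ((x :: xs).getD i ("", 0, 0)) && decide (0 < i) then (1 : Int) else 0) ∘ Nat.succ)
        = (fun i => if q (xs.getD i ("", 0, 0)) then (1 : Int) else 0) := by
      funext i; simp [Function.comp]
    rw [hf, pv_sum_count]
    simp

-- the "i < len - 1" 0/1 sum is countP of dropLast
theorem pv_sum_init (q : String × Int × Int → Bool) (l : List (String × Int × Int)) :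
    ((List.range l.length).map
        (fun i => if q (l.getD i ("", 0, 0)) && decide (i < l.length - 1) then (1 : Int) else 0)).sum
      = (l.dropLast.countP q : Int) := by
  induction l with
  | nil => simp
  | cons x xs ih =>
    simp only [List.length_cons, List.range_succ_eq_map, List.map_cons, List.map_map,
      List.sum_cons, Nat.add_sub_cancel]
    have hf : ((fun i => if q ((x :: xs).getD i ("", 0, 0)) && decide (i < xs.length) then (1 : Int) else 0) ∘ Nat.succ)
        = (fun i => if q (xs.getD i ("", 0, 0)) && decide (i < xs.length - 1) then (1 : Int) else 0) := by
      funext i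
      have h : (i + 1 < xs.length) = (i < xs.length - 1) := by apply propext; omega
      simp [Function.comp, h]
    rw [hf, ih]
    cases xs with
    | nil => simp
    | cons y ys =>
      rw [List.dropLast_cons₂, List.countP_cons]
      by_cases hq : q x <;> simp [hq, Int.add_comm]

-- A's fold in closed form: countP of the tail plus countP of dropLast
theorem pv_A_closed (l_p : List (String × Int × Int)) (l_t : String) :
    c_s_r l_p l_t
      = (((l_p.drop 1).countP (fun t => c_s_r_good l_t t.1) : Int)
        + (l_p.dropLast.countP (fun t => c_s_r_good l_t t.1) : Int)) := by
  unfold c_s_r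
  have hbody : (fun (a : Int) (i : Nat) =>
      let p_type := (l_p.getD i ("", 0, 0)).1
      let c_t_p_a : Bool :=
        if l_t == "horiz" || l_t == "vert" then (p_type == "R" || p_type == "Q")
        else if l_t == "diag" then (p_type == "B" || p_type == "Q")
        else false
      let a := if c_t_p_a && decide (0 < i) then a + 1 else a
      let a := if c_t_p_a && decide (i < l_p.length - 1) then a + 1 else a
      a)
      = (fun (a : Int) (i : Nat) => a +
          ((if c_s_r_good l_t ((l_p.getD i ("", 0, 0)).1) && decide (0 < i) then (1 : Int) else 0)
          + (if c_s_r_good l_t ((l_p.getD i ("", 0, 0)).1) && decide (i < l_p.length - 1) then (1 : Int) else 0))) := by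
    funext a i
    simp only [c_s_r_good]
    split_ifs <;> ring
  rw [hbody, PySem.List.foldl_add, PySem.List.sum_map_add_int,
    pv_sum_tail (fun t => c_s_r_good l_t t.1), pv_sum_init (fun t => c_s_r_good l_t t.1)]
  ring

-- B's edge sum in closed form: the same countP of tail plus countP of dropLast
theorem pv_B_closed (q : String × Int × Int → Bool) (l : List (String × Int × Int)) :
    ((l.zip (l.drop 1)).map (fun ab =>
        (if q ab.1 then (1 : Int) else 0) + (if q ab.2 then (1 : Int) else 0))).sum
      = (((l.drop 1).countP q : Int) + (l.dropLast.countP q : Int)) := by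
  induction l with
  | nil => simp
  | cons x xs ih =>
    cases xs with
    | nil => simp
    | cons y ys =>
      have ih' := ih
      simp only [List.drop_succ_cons, List.drop_zero, List.zip_cons_cons, List.map_cons,
        List.sum_cons] at ih' ⊢
      rw [ih', List.dropLast_cons₂, List.countP_cons (p := q) (a := x), List.countP_cons (p := q) (a := y)]
      by_cases hx : q x <;> by_cases hy : q y <;> simp [hx, hy] <;> ring

-- ===== VERDICT (by name: the statement is the Claim_ definition above) =====
theorem c_s_r_spec : Claim_equal_c_s_r := by
  intro l_p l_t _
  unfold Spec_c_s_r c_s_r_alt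
  rw [pv_A_closed, pv_B_closed (fun t => c_s_r_good l_t t.1)]
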